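-- pv_equiv track=rewrite | github.com/pypi-data/pypi-mirror-390 | packages/webbed-duck/webbed_duck-0.35.0.tar.gz/webbed_duck-0.35.0/tests/test_readme_claims.py | _dependency_names
-- ===== SOURCE A (Python) =====
-- from typing import Callable, Iterable
--
-- def _dependency_names(specs: Iterable[str] | None) -> set[str]:
--     names: set[str] = set()
--     for spec in specs or []:
--         base = spec.split("[", 1)[0]
--         for delimiter in ("<", ">", "=", "!", "~", ";"):
--             base = base.split(delimiter, 1)[0]
--         base = base.strip()
--         if base:
--             names.add(base)
--     return names
-- ===== SOURCE B (Python) =====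
-- def _base(spec):
--     out = []
--     for c in spec:
--         if c in "[<>=!~;":
--             break
--         out.append(c)
--     return "".join(out).strip()
--
-- def _dependency_names(specs):
--     names = set()
--     for spec in specs or []:
--         base = _base(spec)
--         if base:
--             names.add(base)
--     return names
-- ===== Notes on version B (the rewrite author's own statement) =====
-- stated objective: simpler
-- what changed: Replaces the seven chained split(...,1)[0] passes per spec with a single left-to-right scan that stops at the first delimiter character and strips that prefix.
import Mathlib
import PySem

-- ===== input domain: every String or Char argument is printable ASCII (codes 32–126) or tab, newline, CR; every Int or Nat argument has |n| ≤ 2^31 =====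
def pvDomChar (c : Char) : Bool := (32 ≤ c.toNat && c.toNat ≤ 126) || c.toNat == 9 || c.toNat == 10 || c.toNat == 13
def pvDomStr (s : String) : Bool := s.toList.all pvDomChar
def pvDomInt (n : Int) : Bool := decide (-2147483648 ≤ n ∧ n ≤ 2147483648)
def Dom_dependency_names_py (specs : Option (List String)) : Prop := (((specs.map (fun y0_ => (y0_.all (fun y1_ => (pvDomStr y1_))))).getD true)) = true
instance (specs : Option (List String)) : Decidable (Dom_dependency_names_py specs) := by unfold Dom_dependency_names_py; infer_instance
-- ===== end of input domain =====

-- B replaces A's seven chained split(...,1)[0] passes by one left-to-right scan to the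
-- first delimiter character; objective: simpler (one pass per spec instead of seven).

-- ===== PORT A =====
-- base.split(d,1)[0]: splitting on a nonempty separator never raises and always returns a
-- nonempty list, so getD/headD are exact here.
def pySplit1Head (s : String) (d : String) : String :=
  ((PySem.Str.splitMax? s d 1).getD []).headD ""

def dependency_names_py (specs : Option (List String)) : List String :=
  (specs.getD []).foldl
    (fun names spec =>
      let base0 := pySplit1Head spec "["
      let base1 := ["<", ">", "=", "!", "~", ";"].foldl (fun b d => pySplit1Head b d) base0
      let base := PySem.Str.strip base1
      if base ≠ "" then PySem.Set.add names base else names)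
    PySem.Set.empty

-- ===== PORT B =====
def pvBreakChar (c : Char) : Bool :=
  c == '[' || c == '<' || c == '>' || c == '=' || c == '!' || c == '~' || c == ';'

-- the for/break loop of Source B's _base: collect characters until the first delimiter
def pvPrefix : List Char → List Char
  | [] => []
  | c :: rest => if pvBreakChar c then [] else c :: pvPrefix rest

def dependency_names_py_alt (specs : Option (List String)) : List String :=
  (specs.getD []).foldl
    (fun names spec =>
      let base := String.ofList (PySem.Chars.strip (pvPrefix spec.toList))
      if base ≠ "" then PySem.Set.add names base else names)
    PySem.Set.empty

-- ===== PRECONDITION & SPEC =====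
def Spec_dependency_names_py (specs : Option (List String)) (out : List String) : Prop := out = dependency_names_py_alt specs
instance (specs : Option (List String)) (out : List String) : Decidable (Spec_dependency_names_py specs out) := by unfold Spec_dependency_names_py; infer_instance

-- ===== CLAIM (what is proved, stated in full; the proofs are below) =====
def Claim_equal_dependency_names_py : Prop := ∀ (specs : Option (List String)), Dom_dependency_names_py specs → Spec_dependency_names_py specs (dependency_names_py specs)

-- ===== LEMMAS AND PROOFS =====

lemma pvPrefix_eq_takeWhile (l : List Char) :
    pvPrefix l = l.takeWhile (fun c => !pvBreakChar c) := by
  induction l with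
  | nil => rfl
  | cons c rest ih =>
    simp only [pvPrefix, List.takeWhile_cons]
    cases h : pvBreakChar c <;> simp [ih]

lemma go_zero (sep : List Char) (fuel : Nat) (l cur : List Char) (acc : List (List Char)) :
    PySem.Chars.splitOnMax.go sep fuel 0 l cur acc = ((cur.reverse ++ l) :: acc).reverse := by
  cases fuel with
  | zero => rfl
  | succ f => cases l <;> simp [PySem.Chars.splitOnMax.go]

lemma go_one (d : Char) (l : List Char) : ∀ (fuel : Nat) (cur : List Char) (acc : List (List Char)),
    l.length < fuel →
    PySem.Chars.splitOnMax.go [d] fuel 1 l cur acc =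
      acc.reverse ++ (cur.reverse ++ l.takeWhile (fun c => !(c == d))) ::
        (if d ∈ l then [(l.dropWhile (fun c => !(c == d))).drop 1] else []) := by
  induction l with
  | nil =>
    intro fuel cur acc h
    cases fuel with
    | zero => omega
    | succ f => simp [PySem.Chars.splitOnMax.go]
  | cons c rest ih =>
    intro fuel cur acc h
    cases fuel with
    | zero => omega
    | succ f =>
      by_cases hc : c = d
      · subst hc
        simp [PySem.Chars.splitOnMax.go, List.isPrefixOf, go_zero]
      · have hdc : ¬ d = c := fun h' => hc h'.symm
        have hpre : ([d]).isPrefixOf (c :: rest) = false := by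
          simp [List.isPrefixOf, hdc]
        have hr := ih f (c :: cur) acc (by simpa using Nat.lt_of_succ_lt_succ h)
        simp only [PySem.Chars.splitOnMax.go, hpre, if_neg (by omega : ¬ (1 : Nat) = 0),
          Bool.false_eq_true, if_false]
        simp [hr, hc, hdc]

lemma splitOnMax_head (s : List Char) (d : Char) :
    (PySem.Chars.splitOnMax s [d] 1).headD [] = s.takeWhile (fun c => !(c == d)) := by
  unfold PySem.Chars.splitOnMax
  rw [if_neg (by omega)]
  simp only [Int.toNat_one]
  rw [go_one d s (s.length + 1) [] [] (by omega)]
  simp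

lemma pySplit1Head_eq (s : String) (d : String) (dc : Char) (hd : d.toList = [dc]) :
    pySplit1Head s d = String.ofList (s.toList.takeWhile (fun c => !(c == dc))) := by
  unfold pySplit1Head PySem.Str.splitMax? PySem.Chars.splitMax?
  rw [hd]
  rw [if_neg (by simp)]
  simp only [Option.map_some, Option.getD_some]
  rw [← splitOnMax_head s.toList dc]
  cases h : PySem.Chars.splitOnMax s.toList [dc] 1 with
  | nil => simp
  | cons a t => simp

lemma base_eq (spec : String) :
    PySem.Str.strip (["<", ">", "=", "!", "~", ";"].foldl (fun b d => pySplit1Head b d)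
        (pySplit1Head spec "[")) =
      String.ofList (PySem.Chars.strip (pvPrefix spec.toList)) := by
  rw [pvPrefix_eq_takeWhile]
  rw [pySplit1Head_eq spec "[" '[' rfl]
  simp only [List.foldl_cons, List.foldl_nil]
  rw [pySplit1Head_eq _ "<" '<' rfl, pySplit1Head_eq _ ">" '>' rfl,
      pySplit1Head_eq _ "=" '=' rfl, pySplit1Head_eq _ "!" '!' rfl,
      pySplit1Head_eq _ "~" '~' rfl, pySplit1Head_eq _ ";" ';' rfl]
  simp only [String.toList_ofList, List.takeWhile_takeWhile]
  have hp : (fun c : Char => decide ((!(c == ';')) = true ∧ (decide ((!(c == '~')) = true ∧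
      (decide ((!(c == '!')) = true ∧ (decide ((!(c == '=')) = true ∧ (decide ((!(c == '>')) = true ∧
      (decide ((!(c == '<')) = true ∧ (!(c == '[')) = true)) = true)) = true)) = true)) = true)) = true))
      = (fun c : Char => !pvBreakChar c) := by
    funext c
    simp only [pvBreakChar, Bool.not_or]
    by_cases h1 : c = '[' <;> by_cases h2 : c = '<' <;> by_cases h3 : c = '>' <;>
      by_cases h4 : c = '=' <;> by_cases h5 : c = '!' <;> by_cases h6 : c = '~' <;>
      by_cases h7 : c = ';' <;> simp [h1,h2,h3,h4,h5,h6,h7]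
  rw [hp]
  simp [PySem.Str.strip]

-- ===== VERDICT (by name: the statement is the Claim_ definition above) =====
theorem dependency_names_py_spec : Claim_equal_dependency_names_py := by
  intro specs _
  unfold Spec_dependency_names_py dependency_names_py dependency_names_py_alt
  have hstep : (fun (names : List String) (spec : String) =>
      let base0 := pySplit1Head spec "["
      let base1 := ["<", ">", "=", "!", "~", ";"].foldl (fun b d => pySplit1Head b d) base0
      let base := PySem.Str.strip base1
      if base ≠ "" then PySem.Set.add names base else names) =
      (fun (names : List String) (spec : String) =>
      let base := String.ofList (PySem.Chars.strip (pvPrefix spec.toList))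
      if base ≠ "" then PySem.Set.add names base else names) := by
    funext names spec
    simp only [base_eq]
  rw [hstep]
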